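-- pv_equiv track=rewrite | github.com/BrianLi009/PhysicsCheck | orderly_generation/relabel.py | matching_upper
-- ===== SOURCE A (Python) =====
-- import math
--
-- def matching_upper(v):
--     num_edges = math.comb(v, 2)
--     all_entries = list(range(1, num_edges+1))
--     matching = {}
--     all_cols = []
--     col_size = 1
--     while all_entries != []:
--         col = []
--         while len(col) < col_size:
--             col.append(all_entries.pop(0))
--         col_size += 1
--         all_cols.append(col)
--     original_order = list(range(1, num_edges+1))
--     i = 0
--     while i < original_order[-1]:
--         for col in all_cols:
--             if col != []:
--                 matching[original_order[i]] = col.pop(0)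
--                 i += 1
--     return matching
-- ===== SOURCE B (Python) =====
-- def matching_upper(v):
--     # closed form: row r of the transposed triangle takes, for each column c = r..k
--     # (k = v-1 columns of sizes 1..k), the entry c*(c-1)//2 + r; keys are sequential.
--     k = v - 1
--     matching = {}
--     i = 1
--     for r in range(1, k + 1):
--         for c in range(r, k + 1):
--             matching[i] = c * (c - 1) // 2 + r
--             i += 1
--     return matching
-- ===== Notes on version B (the rewrite author's own statement) =====
-- stated objective: faster
-- what changed: B computes each mapped value by the closed form c*(c-1)//2 + r in one nested index loop instead of materialising the entry list, popping it element-by-element into triangular columns and round-robin popping those columns.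
-- outside the precondition, e.g. on matching_upper(0): A raises IndexError, B returns {}; on matching_upper(1): A raises IndexError, B returns {}; on matching_upper(-3): A raises ValueError, B returns {}
import Mathlib
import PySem

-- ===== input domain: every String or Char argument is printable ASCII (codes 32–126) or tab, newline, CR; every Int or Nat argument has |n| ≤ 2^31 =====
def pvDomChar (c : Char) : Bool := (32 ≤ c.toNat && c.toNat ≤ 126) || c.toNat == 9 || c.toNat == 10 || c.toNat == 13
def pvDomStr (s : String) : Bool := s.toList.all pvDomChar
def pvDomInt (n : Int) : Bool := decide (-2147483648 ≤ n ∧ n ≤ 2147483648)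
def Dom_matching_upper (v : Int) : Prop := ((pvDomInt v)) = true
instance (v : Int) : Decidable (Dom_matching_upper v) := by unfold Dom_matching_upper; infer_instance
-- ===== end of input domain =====

-- B replaces A's build-columns-then-round-robin-pop construction by a closed-form nested
-- index loop (value at row r, column c is c*(c-1)//2 + r); objective: faster.

-- ===== PORT A =====

-- the inner 'while len(col) < col_size: col.append(all_entries.pop(0))' loop pops
-- col_size elements off the front; 's' is col_size - 1, so the first column has size s+1.
-- '.take' is exact whenever enough entries remain, which is always the case here because
-- num_edges is a triangular number; Python would raise IndexError otherwise.
def pvBuildCols (entries : List Int) (s : Nat) : List (List Int) :=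
  match entries with
  | [] => []
  | e :: es => ((e :: es).take (s+1)) :: pvBuildCols ((e :: es).drop (s+1)) (s+1)
  termination_by entries.length
  decreasing_by simp [List.length_drop]

-- one iteration of 'for col in all_cols: if col != []: matching[original_order[i]] = col.pop(0); i += 1'
-- (state: cols rebuilt so far, matching, i); '.getD 0' on the original_order[i] lookup is
-- only reached outside Pre_ (Python would raise IndexError there).
def pvPassStep (ord : List Int) (st : List (List Int) × PySem.Dict Int Int × Int)
    (col : List Int) : List (List Int) × PySem.Dict Int Int × Int :=
  match col with
  | [] => (st.1 ++ [[]], st.2.1, st.2.2)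
  | x :: xs => (st.1 ++ [xs], st.2.1.insert ((PySem.List.pyGet? ord st.2.2).getD 0) x, st.2.2 + 1)

-- 'while i < original_order[-1]: for col in all_cols: …'; fuel only makes the loop total
-- (num_edges+1 passes always suffice: each pass past the first empties at least one column).
def pvLoop (ord : List Int) (last : Int) :
    Nat → List (List Int) → PySem.Dict Int Int → Int → PySem.Dict Int Int
  | 0, _, m, _ => m
  | fuel+1, cols, m, i =>
    if i < last then
      let st := cols.foldl (pvPassStep ord) ([], m, i)
      pvLoop ord last fuel st.1 st.2.1 st.2.2
    else m

def matching_upper (v : Int) : List (Int × Int) :=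
  let num_edges := v * (v - 1) / 2      -- math.comb(v, 2); exact for v ≥ 0 (Pre_ has 2 ≤ v; math.comb raises ValueError for v < 0)
  let all_entries := PySem.List.pyRange 1 (num_edges + 1) 1
  let all_cols := pvBuildCols all_entries 0
  let original_order := PySem.List.pyRange 1 (num_edges + 1) 1
  -- original_order[-1]; '.getD 0' only reached when the list is empty (IndexError, outside Pre_)
  let last := (PySem.List.pyGet? original_order (-1)).getD 0
  (pvLoop original_order last (num_edges.toNat + 1) all_cols PySem.Dict.empty 0).items

-- ===== PORT B =====

def matching_upper_alt (v : Int) : List (Int × Int) :=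
  let k := v - 1
  let st := (PySem.List.pyRange 1 (k + 1) 1).foldl
    (fun (st : PySem.Dict Int Int × Int) r =>
      (PySem.List.pyRange r (k + 1) 1).foldl
        (fun (st : PySem.Dict Int Int × Int) c =>
          (st.1.insert st.2 (PySem.Int.floordiv (c * (c - 1)) 2 + r), st.2 + 1)) st)
    (PySem.Dict.empty, 1)
  st.1.items

-- ===== PRECONDITION & SPEC =====
-- Pre_ excludes exactly the inputs where A raises: v < 0 (ValueError in math.comb) and
-- v ∈ {0, 1} (num_edges = 0, so original_order[-1] raises IndexError).
def Pre_matching_upper (v : Int) : Prop := 2 ≤ v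
instance (v : Int) : Decidable (Pre_matching_upper v) := by unfold Pre_matching_upper; infer_instance

def pvWitness_matching_upper : Int := 3

def Spec_matching_upper (v : Int) (out : List (Int × Int)) : Prop := out = matching_upper_alt v
instance (v : Int) (out : List (Int × Int)) : Decidable (Spec_matching_upper v out) := by unfold Spec_matching_upper; infer_instance

-- ===== CLAIM (what is proved, stated in full; the proofs are below) =====
def Claim_equal_matching_upper : Prop := ∀ (v : Int), Dom_matching_upper v → Pre_matching_upper v → Spec_matching_upper v (matching_upper v)

-- ===== LEMMAS AND PROOFS =====

-- [a, a+1, …, a+l-1]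
def intRange (a : Int) : Nat → List Int
  | 0 => []
  | l+1 => a :: intRange (a+1) l

def tri : Nat → Nat
  | 0 => 0
  | n+1 => tri n + (n+1)

def totLen (s : Nat) : Nat → Nat
  | 0 => 0
  | m+1 => (s+1) + totLen (s+1) m

def colsSpec (a : Int) (s : Nat) : Nat → List (List Int)
  | 0 => []
  | m+1 => intRange a (s+1) :: colsSpec (a + (s+1)) (s+1) m

def keyed : List Int → Int → List (Int × Int)
  | [], _ => []
  | x :: xs, i => (i, x) :: keyed xs (i+1)

def insList (m : PySem.Dict Int Int) (ps : List (Int × Int)) : PySem.Dict Int Int :=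
  ps.foldl (fun d p => d.insert p.1 p.2) m

def insRun (ord : List Int) : PySem.Dict Int Int × Int → List Int → PySem.Dict Int Int × Int
  | st, [] => st
  | (m, i), x :: xs => insRun ord (m.insert ((PySem.List.pyGet? ord i).getD 0) x, i + 1) xs

def headsList (p n : Nat) : List Int :=
  (List.range' p (n-p)).map (fun c => ((tri c : Nat) : Int) + p + 1)

def remCols (p n : Nat) : List (List Int) :=
  List.replicate p ([] : List Int)
    ++ (List.range' p (n-p)).map (fun c => intRange (((tri c : Nat) : Int) + p + 1) (c+1-p))

def pairsAux (n : Nat) : Nat → Nat → Int → List (Int × Int)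
  | 0, _, _ => []
  | rows+1, p, i => keyed (headsList p n) (i+1) ++ pairsAux n rows (p+1) (i + ((n - p : Nat) : Int))

def cnt (n : Nat) : Nat → Nat → Nat
  | 0, _ => 0
  | rs+1, p => (n-p) + cnt n rs (p+1)

theorem length_intRange (l : Nat) : ∀ a, (intRange a l).length = l := by
  induction l with
  | zero => intro a; rfl
  | succ l ih => intro a; simp [intRange, ih]

theorem intRange_append (l1 : Nat) : ∀ (l2 : Nat) (a : Int),
    intRange a (l1 + l2) = intRange a l1 ++ intRange (a + (l1 : Int)) l2 := by
  induction l1 with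
  | zero => intro l2 a; simp [intRange]
  | succ l1 ih =>
    intro l2 a
    have : l1 + 1 + l2 = (l1 + l2) + 1 := by omega
    rw [this]
    show a :: intRange (a+1) (l1 + l2) = (a :: intRange (a+1) l1) ++ _
    rw [ih l2 (a+1)]
    simp; ring_nf

theorem pyRange_one_intRange (l : Nat) : ∀ (a : Int),
    PySem.List.pyRange a (a + l) 1 = intRange a l := by
  induction l with
  | zero => intro a; simp [intRange]
  | succ l ih =>
    intro a
    rw [PySem.List.pyRange_one_cons (by omega)]
    have : a + ((l : Int) + 1) = (a + 1) + l := by ring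
    rw [show (a + ((l+1 : Nat) : Int)) = (a + 1) + l by push_cast; ring]
    rw [ih (a+1)]
    rfl

theorem pvBuildCols_append (l1 l2 : List Int) (s : Nat) (h : l1.length = s + 1) :
    pvBuildCols (l1 ++ l2) s = l1 :: pvBuildCols l2 (s+1) := by
  match l1, h with
  | y :: ys, h =>
    show pvBuildCols (y :: (ys ++ l2)) s = _
    rw [pvBuildCols.eq_def]
    simp only []
    have ht : (y :: (ys ++ l2)).take (s+1) = y :: ys := by
      rw [show (y :: (ys ++ l2)) = (y :: ys) ++ l2 from rfl, List.take_left' h]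
    have hd : (y :: (ys ++ l2)).drop (s+1) = l2 := by
      rw [show (y :: (ys ++ l2)) = (y :: ys) ++ l2 from rfl, List.drop_left' h]
    rw [ht, hd]

theorem buildCols_spec (m : Nat) : ∀ (s : Nat) (a : Int),
    pvBuildCols (intRange a (totLen s m)) s = colsSpec a s m := by
  induction m with
  | zero => intro s a; rw [pvBuildCols.eq_def]; simp [totLen, intRange, colsSpec]
  | succ m ih =>
    intro s a
    rw [show totLen s (m+1) = (s+1) + totLen (s+1) m from rfl,
        intRange_append (s+1) (totLen (s+1) m) a,
        pvBuildCols_append _ _ _ (length_intRange (s+1) a),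
        ih (s+1) (a + ((s+1 : Nat) : Int))]
    rfl

theorem tri_succ (n : Nat) : tri (n+1) = tri n + (n+1) := rfl

theorem le_tri (n : Nat) : n ≤ tri n := by
  induction n with
  | zero => simp [tri]
  | succ n ih => rw [tri_succ]; omega

theorem tri_mono {a b : Nat} (h : a ≤ b) : tri a ≤ tri b := by
  induction b with
  | zero => simp_all
  | succ b ih =>
    rcases Nat.lt_or_ge a (b+1) with h' | h'
    · have := ih (by omega); rw [tri_succ]; omega
    · have ha : a = b + 1 := by omega
      rw [ha]

theorem two_tri (n : Nat) : 2 * tri n = n * (n+1) := by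
  induction n with
  | zero => rfl
  | succ n ih =>
    rw [tri_succ, Nat.mul_add, ih]; ring

theorem totLen_tri (m : Nat) : ∀ s, totLen s m + tri s = tri (s + m) := by
  induction m with
  | zero => intro s; simp [totLen]
  | succ m ih =>
    intro s
    have := ih (s+1)
    rw [show totLen s (m+1) = (s+1) + totLen (s+1) m from rfl]
    rw [tri_succ] at this
    have hgoal : s + (m+1) = (s+1) + m := by omega
    rw [hgoal]
    omega

theorem totLen_zero_tri (n : Nat) : totLen 0 n = tri n := by
  have := totLen_tri n 0
  simp [tri] at this
  simpa using this

theorem colsSpec_closed (m : Nat) : ∀ (s : Nat),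
    colsSpec (((tri s : Nat) : Int) + 1) s m
      = (List.range' s m).map (fun c => intRange (((tri c : Nat) : Int) + 1) (c+1)) := by
  induction m with
  | zero => intro s; simp [colsSpec]
  | succ m ih =>
    intro s
    rw [List.range'_succ]
    show intRange _ (s+1) :: colsSpec _ (s+1) m = _
    rw [show ((tri s : Nat) : Int) + 1 + (((s : Nat) : Int) + 1) = ((tri (s+1) : Nat) : Int) + 1 by
      rw [tri_succ]; push_cast; ring]
    rw [ih (s+1)]
    simp

theorem remCols_zero (n : Nat) : remCols 0 n = colsSpec 1 0 n := by
  have h := colsSpec_closed n 0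
  simp only [tri] at h
  norm_num at h
  rw [remCols, h]
  simp

-- the 'for col in all_cols' pass, decomposed: new cols are the tails, the dict/index
-- run over the heads of the nonempty columns
theorem pass_eq (ord : List Int) (cols : List (List Int)) :
    ∀ (acc : List (List Int)) (m : PySem.Dict Int Int) (i : Int),
      cols.foldl (pvPassStep ord) (acc, m, i)
        = (acc ++ cols.map List.tail, insRun ord (m, i) (cols.filterMap List.head?)) := by
  induction cols with
  | nil => intro acc m i; simp [insRun]
  | cons col cols ih =>
    intro acc m i
    match col with
    | [] =>
      show cols.foldl (pvPassStep ord) (acc ++ [[]], m, i) = _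
      rw [ih]
      simp
    | x :: xs =>
      show cols.foldl (pvPassStep ord)
          (acc ++ [xs], m.insert ((PySem.List.pyGet? ord i).getD 0) x, i + 1) = _
      rw [ih]
      simp [insRun]

theorem pyGet?_intRange (l : Nat) : ∀ (a : Int) (j : Nat), j < l →
    PySem.List.pyGet? (intRange a l) ((j : Nat) : Int) = some (a + j) := by
  induction l with
  | zero => omega
  | succ l ih =>
    intro a j hj
    match j with
    | 0 => simp [intRange]
    | j+1 =>
      show PySem.List.pyGet? (a :: intRange (a+1) l) _ = _
      rw [show (((j+1 : Nat)) : Int) = ((j : Nat) : Int) + 1 by push_cast; ring]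
      rw [PySem.List.pyGet?_cons_succ]
      rw [ih (a+1) j (by omega)]
      congr 1
      push_cast; ring

theorem insRun_keyed (N : Nat) (vals : List Int) : ∀ (m : PySem.Dict Int Int) (i : Int),
    0 ≤ i → i + vals.length ≤ (N : Int) →
    insRun (intRange 1 N) (m, i) vals = (insList m (keyed vals (i+1)), i + vals.length) := by
  induction vals with
  | nil => intro m i _ _; simp [insRun, keyed, insList]
  | cons x xs ih =>
    intro m i h0 hN
    show insRun _ (m.insert ((PySem.List.pyGet? (intRange 1 N) i).getD 0) x, i + 1) xs = _
    have hi : i = ((i.toNat : Nat) : Int) := by omega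
    have hlt : i.toNat < N := by simp at hN; omega
    rw [hi, pyGet?_intRange N 1 i.toNat hlt]
    simp only [Option.getD_some]
    rw [show (1 : Int) + (i.toNat : Int) = ((i.toNat : Int)) + 1 by ring]
    rw [← hi]
    rw [ih (m.insert (i+1) x) (i+1) (by omega) (by simp at hN ⊢; omega)]
    rw [Prod.mk.injEq]
    exact ⟨rfl, by simp; ring⟩

theorem filterMap_head?_replicate (p : Nat) :
    (List.replicate p ([] : List Int)).filterMap List.head? = [] := by
  induction p with
  | zero => rfl
  | succ p ih => simp [List.replicate_succ, ih]

theorem filterMap_head?_map {L : List Nat} {f : Nat → List Int} {g : Nat → Int}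
    (h : ∀ c ∈ L, (f c).head? = some (g c)) :
    (L.map f).filterMap List.head? = L.map g := by
  induction L with
  | nil => rfl
  | cons c cs ih =>
    simp only [List.map_cons, List.filterMap_cons, h c (by simp)]
    rw [ih (fun c hc => h c (by simp [hc]))]

theorem remCols_heads (p n : Nat) (hpn : p < n) :
    (remCols p n).filterMap List.head? = headsList p n := by
  rw [remCols, List.filterMap_append, filterMap_head?_replicate, List.nil_append, headsList]
  apply filterMap_head?_map
  intro c hc
  have hcp : p ≤ c := by rcases List.mem_range'.mp hc with ⟨j, _, rfl⟩; omega
  rw [show c + 1 - p = (c - p) + 1 by omega]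
  rfl

theorem remCols_tail (p n : Nat) (hpn : p < n) :
    (remCols p n).map List.tail = remCols (p+1) n := by
  rw [remCols, remCols, List.map_append, List.map_replicate]
  have h1 : n - p = (n - (p+1)) + 1 := by omega
  rw [h1, List.range'_succ, List.map_cons, List.map_cons]
  rw [show p + 1 - p = 1 by omega]
  have htail : (intRange (((tri p : Nat) : Int) + p + 1) 1).tail = ([] : List Int) := rfl
  rw [htail, List.replicate_succ']
  simp only [List.append_assoc, List.singleton_append]
  congr 1
  congr 1
  rw [List.map_map]
  apply List.map_congr_left
  intro c hc
  have hcp : p + 1 ≤ c := by rcases List.mem_range'.mp hc with ⟨j, _, rfl⟩; omega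
  simp only [Function.comp_apply]
  rw [show c + 1 - p = (c + 1 - (p+1)) + 1 by omega]
  show intRange (((tri c : Nat) : Int) + p + 1 + 1) (c + 1 - (p+1)) = _
  congr 1

theorem length_headsList (p n : Nat) : (headsList p n).length = n - p := by
  simp [headsList]

-- the main invariant of A's while-loop: after p popping passes the columns are the
-- remCols p n suffixes, i counts the popped entries, and the loop appends exactly
-- the pairsAux rows
theorem loopA (n : Nat) : ∀ (rows : Nat) (p fuel : Nat) (m : PySem.Dict Int Int) (i : Int),
    p + rows = n → i = ((tri n : Nat) : Int) - ((tri (n-p) : Nat) : Int) → rows < fuel →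
    pvLoop (intRange 1 (tri n)) ((tri n : Nat) : Int) fuel (remCols p n) m i
      = insList m (pairsAux n rows p i) := by
  intro rows
  induction rows with
  | zero =>
    intro p fuel m i hp hi hf
    have hpn : p = n := by omega
    subst hpn
    have : i = ((tri p : Nat) : Int) := by simp at hi; omega
    match fuel, hf with
    | f+1, _ =>
      rw [pvLoop]
      simp [this, pairsAux, insList]
  | succ rows ih =>
    intro p fuel m i hp hi hf
    have hpn : p < n := by omega
    have hnp : n - p = rows + 1 := by omega
    have htp : 0 < tri (n-p) := by rw [hnp, tri_succ]; omega
    have htm : tri (n-p) ≤ tri n := tri_mono (by omega)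
    have hcond : i < ((tri n : Nat) : Int) := by omega
    match fuel, hf with
    | f+1, hf =>
      rw [pvLoop]
      rw [if_pos hcond]
      rw [pass_eq]
      rw [remCols_tail p n hpn, remCols_heads p n hpn]
      have hlen : (headsList p n).length = n - p := length_headsList p n
      have hbound : i + ((headsList p n).length : Int) ≤ ((tri n : Nat) : Int) := by
        rw [hlen]
        have := le_tri (n-p)
        push_cast
        omega
      rw [insRun_keyed (tri n) (headsList p n) m i (by omega) hbound]
      simp only [hlen, List.nil_append]
      have hi' : i + ((n - p : Nat) : Int)
          = ((tri n : Nat) : Int) - ((tri (n-(p+1)) : Nat) : Int) := by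
        have h1 : n - p = (n - (p+1)) + 1 := by omega
        have h2 : tri (n - p) = tri (n-(p+1)) + (n - p) := by
          rw [h1, tri_succ]
        rw [hi, h2]
        push_cast
        omega
      rw [ih (p+1) f _ _ (by omega) hi' (by omega)]
      simp only [pairsAux, insList, List.foldl_append]

-- B's inner 'for c in range(r, k+1)' loop
theorem innerB (f : Int → Int) (cs : List Int) : ∀ (d : PySem.Dict Int Int) (i : Int),
    cs.foldl (fun (st : PySem.Dict Int Int × Int) c => (st.1.insert st.2 (f c), st.2 + 1)) (d, i)
      = (insList d (keyed (cs.map f) i), i + cs.length) := by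
  induction cs with
  | nil => intro d i; simp [insList, keyed]
  | cons c cs ih =>
    intro d i
    show cs.foldl _ (d.insert i (f c), i + 1) = _
    rw [ih (d.insert i (f c)) (i+1)]
    rw [Prod.mk.injEq]
    exact ⟨rfl, by simp; ring⟩

theorem intRange_cast (k : Nat) : ∀ (p : Nat),
    intRange (((p : Nat) : Int) + 1) k = (List.range' p k).map (fun c => ((c : Nat) : Int) + 1) := by
  induction k with
  | zero => intro p; simp [intRange]
  | succ k ih =>
    intro p
    rw [List.range'_succ, List.map_cons]
    show (((p : Nat) : Int) + 1) :: intRange (((p : Nat) : Int) + 1 + 1) k = _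
    congr 1
    rw [show ((p : Nat) : Int) + 1 + 1 = (((p+1 : Nat) : Nat) : Int) + 1 by push_cast; ring]
    exact ih (p+1)

theorem floordiv_val (c : Nat) :
    PySem.Int.floordiv ((((c : Nat) : Int) + 1) * (((c : Nat) : Int) + 1 - 1)) 2
      = ((tri c : Nat) : Int) := by
  have h2 : (((c : Nat) : Int) + 1) * (((c : Nat) : Int) + 1 - 1) = 2 * ((tri c : Nat) : Int) := by
    have := two_tri c
    push_cast
    nlinarith [this]
  rw [h2, PySem.Int.floordiv_eq_ediv_of_pos (by norm_num)]
  exact Int.mul_ediv_cancel_left _ (by norm_num)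

theorem mapB_heads (k p : Nat) (r : Int) (hr : r = ((p : Nat) : Int) + 1) :
    (intRange (((p : Nat) : Int) + 1) k).map
        (fun c => PySem.Int.floordiv (c * (c - 1)) 2 + r)
      = (List.range' p k).map (fun c => ((tri c : Nat) : Int) + p + 1) := by
  rw [intRange_cast k p, List.map_map]
  apply List.map_congr_left
  intro c _
  simp only [Function.comp_apply]
  rw [floordiv_val c, hr]
  ring

-- B's outer 'for r in range(1, k+1)' loop builds the same pairsAux rows
theorem outerB (n : Nat) : ∀ (rs : Nat) (p : Nat) (d : PySem.Dict Int Int) (i : Int),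
    p + rs = n →
    (intRange (((p : Nat) : Int) + 1) rs).foldl
        (fun (st : PySem.Dict Int Int × Int) r =>
          (PySem.List.pyRange r (((n : Nat) : Int) + 1) 1).foldl
            (fun (st : PySem.Dict Int Int × Int) c =>
              (st.1.insert st.2 (PySem.Int.floordiv (c * (c - 1)) 2 + r), st.2 + 1)) st)
        (d, i + 1)
      = (insList d (pairsAux n rs p i), i + ((cnt n rs p : Nat) : Int) + 1) := by
  intro rs
  induction rs with
  | zero =>
    intro p d i hp
    simp [intRange, pairsAux, insList, cnt]
  | succ rs ih =>
    intro p d i hp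
    show (intRange (((p : Nat) : Int) + 1 + 1) rs).foldl _
        ((PySem.List.pyRange (((p : Nat) : Int) + 1) (((n : Nat) : Int) + 1) 1).foldl _ (d, i + 1)) = _
    have hrange : PySem.List.pyRange (((p : Nat) : Int) + 1) (((n : Nat) : Int) + 1) 1
        = intRange (((p : Nat) : Int) + 1) (n - p) := by
      rw [show ((n : Nat) : Int) + 1 = (((p : Nat) : Int) + 1) + ((n - p : Nat) : Int) by
        push_cast; omega]
      exact_mod_cast pyRange_one_intRange (n - p) (((p : Nat) : Int) + 1)
    rw [hrange]
    rw [innerB _ (intRange (((p : Nat) : Int) + 1) (n - p)) d (i+1)]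
    rw [mapB_heads (n-p) p (((p : Nat) : Int) + 1) rfl]
    rw [← headsList]
    rw [length_intRange]
    have hstep : i + 1 + ((n - p : Nat) : Int) = (i + ((n - p : Nat) : Int)) + 1 := by ring
    rw [hstep]
    rw [show ((p : Nat) : Int) + 1 + 1 = (((p + 1 : Nat) : Nat) : Int) + 1 by push_cast; ring]
    rw [ih (p+1) (insList d (keyed (headsList p n) (i+1))) (i + ((n - p : Nat) : Int)) (by omega)]
    simp only [pairsAux, insList, List.foldl_append, Prod.mk.injEq]
    refine ⟨trivial, ?_⟩
    rw [show cnt n (rs+1) p = (n-p) + cnt n rs (p+1) from rfl]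
    push_cast
    ring

theorem intRange_getLast? (l : Nat) : ∀ (a : Int), 0 < l →
    (intRange a l).getLast? = some (a + l - 1) := by
  induction l with
  | zero => omega
  | succ l ih =>
    intro a _
    match l, ih with
    | 0, _ => simp [intRange]
    | l+1, ih =>
      show ((a :: intRange (a+1) (l+1)).getLast?) = _
      have hc : intRange (a+1) (l+1) = (a+1) :: intRange ((a+1)+1) l := rfl
      rw [hc, List.getLast?_cons_cons, ← hc, ih (a+1) (by omega)]
      congr 1
      push_cast; ring

-- ===== VERDICT helper: the common normal form =====
theorem matching_upper_eq_pairs (v : Int) (h : 2 ≤ v) :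
    matching_upper v = (insList PySem.Dict.empty (pairsAux (v-1).toNat (v-1).toNat 0 0)).items := by
  set n : Nat := (v-1).toNat with hn
  have hv : v - 1 = ((n : Nat) : Int) := by omega
  have hn1 : 1 ≤ n := by omega
  have hE : v * (v - 1) / 2 = ((tri n : Nat) : Int) := by
    have hprod : v * (v - 1) = 2 * ((tri n : Nat) : Int) := by
      have h2 := two_tri n
      have hveq : v = ((n : Nat) : Int) + 1 := by omega
      rw [hveq]
      push_cast
      nlinarith [h2]
    rw [hprod]
    exact Int.mul_ediv_cancel_left _ (by norm_num)
  show (pvLoop _ _ _ _ _ _).items = _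
  rw [hE]
  have hrange : PySem.List.pyRange 1 (((tri n : Nat) : Int) + 1) 1 = intRange 1 (tri n) := by
    have := pyRange_one_intRange (tri n) 1
    rw [show (1 : Int) + ((tri n : Nat) : Int) = ((tri n : Nat) : Int) + 1 by ring] at this
    exact this
  rw [hrange]
  have hcols : pvBuildCols (intRange 1 (tri n)) 0 = remCols 0 n := by
    rw [← totLen_zero_tri n, buildCols_spec n 0 1, remCols_zero]
  rw [hcols]
  have htri1 : 0 < tri n := by have := le_tri n; omega
  have hlast : (PySem.List.pyGet? (intRange 1 (tri n)) (-1)).getD 0 = ((tri n : Nat) : Int) := by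
    rw [PySem.List.pyGet?_neg_one, intRange_getLast? (tri n) 1 htri1]
    simp
  rw [hlast]
  have hfuel : (((tri n : Nat) : Int)).toNat + 1 = tri n + 1 := by simp
  rw [hfuel]
  rw [loopA n n 0 (tri n + 1) PySem.Dict.empty 0 (by omega)
    (by simp) (by have := le_tri n; omega)]

theorem matching_upper_alt_eq_pairs (v : Int) (h : 2 ≤ v) :
    matching_upper_alt v = (insList PySem.Dict.empty (pairsAux (v-1).toNat (v-1).toNat 0 0)).items := by
  set n : Nat := (v-1).toNat with hn
  have hv : v - 1 = ((n : Nat) : Int) := by omega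
  show ((PySem.List.pyRange 1 (v - 1 + 1) 1).foldl _ (PySem.Dict.empty, 1)).1.items = _
  rw [hv]
  have hrange : PySem.List.pyRange 1 (((n : Nat) : Int) + 1) 1 = intRange (((0 : Nat) : Int) + 1) n := by
    have := pyRange_one_intRange n 1
    rw [show (1 : Int) + ((n : Nat) : Int) = ((n : Nat) : Int) + 1 by ring] at this
    rw [this]
    norm_num
  rw [hrange]
  have h0 : (PySem.Dict.empty (κ := Int) (ν := Int), (1 : Int)) = (PySem.Dict.empty, (0 : Int) + 1) := by
    norm_num
  rw [h0]
  rw [outerB n n 0 PySem.Dict.empty 0 (by omega)]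

-- ===== VERDICT (by name: the statement is the Claim_ definition above) =====
theorem matching_upper_spec : Claim_equal_matching_upper := by
  intro v _ hpre
  unfold Spec_matching_upper
  rw [matching_upper_eq_pairs v hpre, matching_upper_alt_eq_pairs v hpre]
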